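-- pv_equiv track=rewrite | github.com/gabrielpuente58/ThryveIQ | backend/services/tools/allocate_week_structure.py | _interleave_sports
-- ===== SOURCE A (Python) =====
-- def _interleave_sports(sports: list[str]) -> list[str]:
--     """
--     Interleave sport repetitions so the same sport isn't back-to-back where possible.
--
--     Uses a round-robin bucket approach similar to plan_engine._distribute_sports.
--     """
--     from collections import Counter, deque
--
--     count = Counter(sports)
--     # Build sorted buckets by descending frequency to always pull most frequent first
--     buckets: dict[str, deque] = {
--         sport: deque([sport] * n) for sport, n in count.items()
--     }
--     order = sorted(count.keys(), key=lambda s: -count[s])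
--
--     result: list[str] = []
--     while any(buckets[s] for s in order):
--         for s in order:
--             if buckets[s]:
--                 result.append(buckets[s].popleft())
--
--     return result
-- ===== SOURCE B (Python) =====
-- def _interleave_sports(sports: list[str]) -> list[str]:
--     """
--     Interleave sport repetitions so the same sport isn't back-to-back where possible.
--
--     Output-sensitive rewrite: since the round-robin order is sorted by descending
--     count, the sports still active in round r form a PREFIX of that order, so each
--     round just emits a prefix whose length is maintained by a pointer that only
--     ever moves left.
--     """
--     from collections import Counter
--
--     count = Counter(sports)
--     order = sorted(count, key=lambda s: -count[s])
--
--     result: list[str] = []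
--     k = len(order)
--     for r in range(count[order[0]] if order else 0):
--         while k and count[order[k - 1]] <= r:
--             k -= 1
--         result.extend(order[:k])
--     return result
-- ===== Notes on version B (the rewrite author's own statement) =====
-- stated objective: faster
-- what changed: A re-scans every bucket twice per round (the any() emptiness test plus the per-sport bucket check); B sorts once by descending count and per round emits a prefix of that order whose length is maintained by a pointer that only ever moves left, so each round costs only its output.
import Mathlib
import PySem

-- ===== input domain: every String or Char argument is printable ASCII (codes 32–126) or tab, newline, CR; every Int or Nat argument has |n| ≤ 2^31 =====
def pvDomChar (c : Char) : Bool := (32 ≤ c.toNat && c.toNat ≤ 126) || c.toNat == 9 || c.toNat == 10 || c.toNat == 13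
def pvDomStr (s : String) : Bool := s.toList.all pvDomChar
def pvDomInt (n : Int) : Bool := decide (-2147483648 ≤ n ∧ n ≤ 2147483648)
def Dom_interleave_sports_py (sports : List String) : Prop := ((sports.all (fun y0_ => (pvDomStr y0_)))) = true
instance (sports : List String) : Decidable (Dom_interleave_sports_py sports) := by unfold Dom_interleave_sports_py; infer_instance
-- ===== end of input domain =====

-- B replaces A's per-round scan over all buckets by emitting, per round, a prefix of the
-- descending-count order maintained with a pointer that only moves left (output-sensitive).

-- ===== PORT A =====
-- body of A's inner `for s in order:` loop: pop the left of bucket[s] if nonempty, append it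
def pvAStep (st : PySem.Dict String (List String) × List String) (s : String) :
    PySem.Dict String (List String) × List String :=
  match st.1.getD s [] with
  | [] => st
  | x :: t => (st.1.insert s t, st.2 ++ [x])

-- measure for A's while loop: total number of elements left in the buckets of `order`
def pvMsr (order : List String) (d : PySem.Dict String (List String)) : Nat :=
  (order.map (fun s => (d.getD s []).length)).sum

-- termination fact for the while loop (cited in decreasing_by)
theorem pvMsr_foldl (L : List String) (order : List String) (hL : ∀ s ∈ L, s ∈ order)
    (d : PySem.Dict String (List String)) (res : List String) :
    pvMsr order (L.foldl pvAStep (d, res)).1 ≤ pvMsr order d ∧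
    ((∃ s ∈ L, d.getD s [] ≠ []) → pvMsr order (L.foldl pvAStep (d, res)).1 < pvMsr order d) := by
  induction L generalizing d res with
  | nil => exact ⟨le_refl _, fun ⟨s, hs, _⟩ => absurd hs (List.not_mem_nil)⟩
  | cons a L ih =>
    have hao : a ∈ order := hL a List.mem_cons_self
    have hL' : ∀ s ∈ L, s ∈ order := fun s hs => hL s (List.mem_cons_of_mem _ hs)
    rw [List.foldl_cons]
    cases hda : d.getD a [] with
    | nil =>
      have hstep : pvAStep (d, res) a = (d, res) := by simp [pvAStep, hda]
      rw [hstep]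
      refine ⟨(ih hL' d res).1, fun ⟨s, hs, hne⟩ => ?_⟩
      rcases List.mem_cons.mp hs with rfl | hs'
      · exact absurd hda hne
      · exact (ih hL' d res).2 ⟨s, hs', hne⟩
    | cons x t =>
      have hstep : pvAStep (d, res) a = (d.insert a t, res ++ [x]) := by simp [pvAStep, hda]
      rw [hstep]
      have hpt : ∀ s', (((d.insert a t).getD s' []).length) ≤ ((d.getD s' []).length) := by
        intro s'
        rw [PySem.Dict.getD_insert]
        split_ifs with hss
        · subst hss; rw [hda]; simp
        · exact le_refl _
      have hlt : pvMsr order (d.insert a t) < pvMsr order d := by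
        refine List.sum_lt_sum _ _ (fun i _ => hpt i) ⟨a, hao, ?_⟩
        rw [PySem.Dict.getD_insert, if_pos rfl, hda]; simp
      have h1 := (ih hL' (d.insert a t) (res ++ [x])).1
      exact ⟨le_of_lt (lt_of_le_of_lt h1 hlt), fun _ => lt_of_le_of_lt h1 hlt⟩

-- A's `while any(buckets[s] for s in order): for s in order: …` (buckets[s]: every s ∈ order is
-- a key of buckets, so the getD default is never read)
def pvAWhile (order : List String) (d : PySem.Dict String (List String)) (res : List String) :
    List String :=
  if h : order.any (fun s => !(d.getD s []).isEmpty) then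
    pvAWhile order (order.foldl pvAStep (d, res)).1 (order.foldl pvAStep (d, res)).2
  else res
termination_by pvMsr order d
decreasing_by
  simp only [List.foldl_attach]
  refine (pvMsr_foldl order order (fun s hs => hs) d res).2 ?_
  simp only [List.any_eq_true] at h
  obtain ⟨s, hs, hne⟩ := h
  exact ⟨s, hs, by simpa using hne⟩

def interleave_sports_py (sports : List String) : List String :=
  let count := PySem.Dict.counter sports
  -- {sport: deque([sport] * n) for sport, n in count.items()}; n ≥ 1, so n.toNat is exact
  let buckets := count.items.foldl
    (fun (d : PySem.Dict String (List String)) p => d.insert p.1 (List.replicate p.2.toNat p.1))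
    PySem.Dict.empty
  let order := PySem.List.sorted count.keys (fun s => -(count.getD s 0)) false
  pvAWhile order buckets []

-- ===== PORT B =====
-- B's inner `while k and count[order[k - 1]] <= r: k -= 1` (order[k-1] is in range: k ≤ len(order)
-- is a loop invariant, so pyGetD's default is never read; Counter lookup defaults to 0)
def pvBShrink (count : PySem.Dict String Int) (order : List String) (r : Int) : Nat → Nat
  | 0 => 0
  | k + 1 =>
    if count.getD (PySem.List.pyGetD order ((k : Int) + 1 - 1) "") 0 ≤ r then
      pvBShrink count order r k
    else k + 1

def interleave_sports_py_alt (sports : List String) : List String :=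
  let count := PySem.Dict.counter sports
  let order := PySem.List.sorted count.keys (fun s => -(count.getD s 0)) false
  let maxc : Int := match order with | [] => 0 | s :: _ => count.getD s 0
  -- for r in range(maxc): shrink k, then result.extend(order[:k]) (k ≥ 0, so order[:k] = take k)
  ((PySem.List.pyRange 0 maxc 1).foldl
    (fun (st : Nat × List String) r =>
      (pvBShrink count order r st.1, st.2 ++ order.take (pvBShrink count order r st.1)))
    (order.length, [])).2

-- ===== PRECONDITION & SPEC =====
def Spec_interleave_sports_py (sports : List String) (out : List String) : Prop := out = interleave_sports_py_alt sports
instance (sports : List String) (out : List String) : Decidable (Spec_interleave_sports_py sports out) := by unfold Spec_interleave_sports_py; infer_instance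

-- ===== CLAIM (what is proved, stated in full; the proofs are below) =====
def Claim_equal_interleave_sports_py : Prop := ∀ (sports : List String), Dom_interleave_sports_py sports → Spec_interleave_sports_py sports (interleave_sports_py sports)

-- ===== LEMMAS AND PROOFS =====

-- common spec: concatenation over rounds r < m of the sports with count > r, in `order` order
def pvRounds (c : String → Nat) (order : List String) (m : Nat) : List String :=
  (List.range m).flatMap (fun r => order.filter (fun s => decide (r < c s)))

def pvMOver (c : String → Nat) (order : List String) : Nat := (order.map c).foldl max 0

theorem pvMOver_eq_zero_iff (c : String → Nat) (order : List String) :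
    pvMOver c order = 0 ↔ ∀ s ∈ order, c s = 0 := by
  constructor
  · intro h s hs
    have := (PySem.List.le_foldl_max (order.map c) 0).2 (c s) (List.mem_map_of_mem hs)
    unfold pvMOver at h
    omega
  · intro h
    rcases PySem.List.foldl_max_mem (order.map c) 0 with h0 | hmem
    · exact h0
    · obtain ⟨s, hs, heq⟩ := List.mem_map.mp hmem
      unfold pvMOver
      have h2 := h s hs
      rw [heq] at h2
      exact h2

theorem pvMOver_pred (c : String → Nat) (order : List String) :
    pvMOver (fun s => c s - 1) order = pvMOver c order - 1 := by
  have aux : ∀ (l : List String) (i : Nat),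
      (l.map (fun s => c s - 1)).foldl max (i - 1) = (l.map c).foldl max i - 1 := by
    intro l
    induction l with
    | nil => intro i; rfl
    | cons a l ih =>
      intro i
      simp only [List.map_cons, List.foldl_cons]
      rw [show max (i - 1) (c a - 1) = max i (c a) - 1 by omega]
      exact ih (max i (c a))
  simpa using aux order 0

theorem pvRounds_succ_shift (c : String → Nat) (order : List String) (m : Nat) :
    pvRounds c order (m + 1) =
      order.filter (fun s => decide (c s ≠ 0)) ++ pvRounds (fun s => c s - 1) order m := by
  unfold pvRounds
  rw [List.range_succ_eq_map, List.flatMap_cons, List.flatMap_map]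
  congr 1
  · exact List.filter_congr (fun x _ => by rw [decide_eq_decide]; omega)
  · refine List.flatMap_congr ?_
    intro r _
    refine List.filter_congr (fun x _ => ?_)
    have hb : (fun s => c s - 1) x = c x - 1 := rfl
    rw [decide_eq_decide, hb]
    omega

theorem pvFold_pop (c : String → Nat) :
    ∀ (L : List String) (d : PySem.Dict String (List String)) (res : List String), L.Nodup →
    (∀ s ∈ L, d.getD s [] = List.replicate (c s) s) →
    (L.foldl pvAStep (d, res)).2 = res ++ L.filter (fun s => decide (c s ≠ 0)) ∧
    (∀ s ∈ L, (L.foldl pvAStep (d, res)).1.getD s [] = List.replicate (c s - 1) s) ∧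
    (∀ t, t ∉ L → (L.foldl pvAStep (d, res)).1.getD t [] = d.getD t []) := by
  intro L
  induction L with
  | nil =>
    intro d res _ _
    exact ⟨by simp, fun s hs => absurd hs (List.not_mem_nil), fun t _ => rfl⟩
  | cons a L ih =>
    intro d res hnd h
    have hna : a ∉ L := (List.nodup_cons.mp hnd).1
    have hndL : L.Nodup := (List.nodup_cons.mp hnd).2
    have hda : d.getD a [] = List.replicate (c a) a := h a List.mem_cons_self
    rw [List.foldl_cons]
    cases hc0 : c a with
    | zero =>
      have hstep : pvAStep (d, res) a = (d, res) := by
        simp [pvAStep, hda, hc0]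
      rw [hstep]
      obtain ⟨h1, h2, h3⟩ := ih d res hndL (fun s hs => h s (List.mem_cons_of_mem _ hs))
      refine ⟨?_, ?_, ?_⟩
      · rw [h1, List.filter_cons]
        simp [hc0]
      · intro s hs
        rcases List.mem_cons.mp hs with rfl | hs'
        · rw [h3 s hna, hda, hc0]
        · exact h2 s hs'
      · intro t ht
        exact h3 t (fun h' => ht (List.mem_cons_of_mem _ h'))
    | succ n =>
      have hstep : pvAStep (d, res) a = (d.insert a (List.replicate n a), res ++ [a]) := by
        simp [pvAStep, hda, hc0, List.replicate_succ]
      rw [hstep]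
      have hrep : ∀ s ∈ L, (d.insert a (List.replicate n a)).getD s [] = List.replicate (c s) s := by
        intro s hs
        rw [PySem.Dict.getD_insert, if_neg (by intro hsa; subst hsa; exact hna hs)]
        exact h s (List.mem_cons_of_mem _ hs)
      obtain ⟨h1, h2, h3⟩ := ih (d.insert a (List.replicate n a)) (res ++ [a]) hndL hrep
      refine ⟨?_, ?_, ?_⟩
      · rw [h1, List.filter_cons]
        simp [hc0]
      · intro s hs
        rcases List.mem_cons.mp hs with rfl | hs'
        · rw [h3 s hna, PySem.Dict.getD_insert, if_pos rfl, hc0]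
          simp
        · exact h2 s hs'
      · intro t ht
        rw [h3 t (fun h' => ht (List.mem_cons_of_mem _ h')), PySem.Dict.getD_insert,
          if_neg (by intro hta; subst hta; exact ht List.mem_cons_self)]

theorem pvAWhile_eq (m : Nat) : ∀ (c : String → Nat) (order : List String)
    (d : PySem.Dict String (List String)) (res : List String), order.Nodup →
    pvMOver c order = m →
    (∀ s ∈ order, d.getD s [] = List.replicate (c s) s) →
    pvAWhile order d res = res ++ pvRounds c order m := by
  induction m with
  | zero =>
    intro c order d res hnd hm hrep
    rw [pvAWhile]
    have hcond : ¬ (order.any fun s => !(d.getD s []).isEmpty) = true := by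
      simp only [List.any_eq_true, not_exists]
      intro s hcontra
      obtain ⟨hs, hne⟩ := hcontra
      rw [hrep s hs] at hne
      rw [(pvMOver_eq_zero_iff c order).mp hm s hs] at hne
      simp at hne
    rw [dif_neg hcond]
    simp [pvRounds]
  | succ m ihm =>
    intro c order d res hnd hm hrep
    rw [pvAWhile]
    have hex : ∃ s ∈ order, c s ≠ 0 := by
      by_contra hall
      push_neg at hall
      rw [(pvMOver_eq_zero_iff c order).mpr hall] at hm
      omega
    have hcond : (order.any fun s => !(d.getD s []).isEmpty) = true := by
      simp only [List.any_eq_true]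
      obtain ⟨s, hs, hne⟩ := hex
      refine ⟨s, hs, ?_⟩
      rw [hrep s hs]
      simp [hne]
    rw [dif_pos hcond]
    obtain ⟨h1, h2, _⟩ := pvFold_pop c order d res hnd hrep
    rw [h1]
    rw [ihm (fun s => c s - 1) order (order.foldl pvAStep (d, res)).1
      (res ++ order.filter (fun s => decide (c s ≠ 0))) hnd
      (by rw [pvMOver_pred, hm]; omega) h2]
    rw [pvRounds_succ_shift, List.append_assoc]

-- on a list whose elements satisfy p in an antitone way, filter = takeWhile
theorem pvFilter_eq_takeWhile {α : Type} (p : α → Bool) :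
    ∀ (l : List α), l.Pairwise (fun a b => p b = true → p a = true) →
    l.filter p = l.takeWhile p := by
  intro l hl
  induction l with
  | nil => rfl
  | cons a l ih =>
    rw [List.pairwise_cons] at hl
    by_cases hp : p a = true
    · simp [List.filter_cons, hp, ih hl.2]
    · simp only [List.filter_cons, List.takeWhile_cons, hp]
      simp only [Bool.false_eq_true, if_false]
      exact List.filter_eq_nil_iff.mpr (fun b hb hpb => hp (hl.1 b hb hpb))

theorem pvTakeWhile_len_le {α : Type} (p q : α → Bool) (h : ∀ x, p x = true → q x = true) :
    ∀ (l : List α), (l.takeWhile p).length ≤ (l.takeWhile q).length := by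
  intro l
  induction l with
  | nil => exact le_refl _
  | cons a l ih =>
    by_cases hp : p a = true
    · simp [hp, h a hp]; exact ih
    · simp [hp]

theorem pvBShrink_eq (count : PySem.Dict String Int) (order : List String) (c : String → Nat)
    (hc : ∀ s, count.getD s 0 = (c s : Int)) (j : Nat)
    (hpair : order.Pairwise (fun a b => c b ≤ c a)) :
    ∀ k, (order.takeWhile (fun s => decide (j < c s))).length ≤ k → k ≤ order.length →
    pvBShrink count order (j : Int) k = (order.takeWhile (fun s => decide (j < c s))).length := by
  have hpair' : order.Pairwise (fun a b =>
      (fun s => decide (j < c s)) b = true → (fun s => decide (j < c s)) a = true) := by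
    refine hpair.imp ?_
    intro a b hab hb
    simp only [decide_eq_true_eq] at *
    omega
  have hfoldtw := pvFilter_eq_takeWhile (fun s => decide (j < c s)) order hpair'
  have hsplit : order.takeWhile (fun s => decide (j < c s)) ++
      order.dropWhile (fun s => decide (j < c s)) = order := List.takeWhile_append_dropWhile
  have hdw : ∀ x ∈ order.dropWhile (fun s => decide (j < c s)), ¬ (j < c x) := by
    have hftw : (order.takeWhile (fun s => decide (j < c s))).filter
        (fun s => decide (j < c s)) = order.takeWhile (fun s => decide (j < c s)) :=
      List.filter_eq_self.mpr (fun a ha => List.mem_takeWhile_imp (p := fun s => decide (j < c s)) ha)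
    have : order.filter (fun s => decide (j < c s)) =
        order.takeWhile (fun s => decide (j < c s)) ++
        (order.dropWhile (fun s => decide (j < c s))).filter (fun s => decide (j < c s)) := by
      conv_lhs => rw [← hsplit]
      rw [List.filter_append, hftw]
    rw [hfoldtw] at this
    have hnil : (order.dropWhile (fun s => decide (j < c s))).filter
        (fun s => decide (j < c s)) = [] := by
      exact List.append_right_eq_self.mp this.symm
    intro x hx
    have := List.filter_eq_nil_iff.mp hnil x hx
    simpa using this
  intro k
  induction k with
  | zero =>
    intro h1 _
    rw [pvBShrink]
    omega
  | succ k ihk =>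
    intro h1 h2
    have hklen : k < order.length := by omega
    have hidx : PySem.List.pyGetD order ((k : Int) + 1 - 1) "" = order[k] := by
      rw [show ((k : Int) + 1 - 1) = (k : Int) by ring, PySem.List.pyGetD_natCast]
      exact List.getD_eq_getElem order "" hklen
    rw [pvBShrink, hidx, hc]
    by_cases htw : (order.takeWhile (fun s => decide (j < c s))).length ≤ k
    · have hmem : order[k] ∈ order.dropWhile (fun s => decide (j < c s)) := by
        have he : order[k] = (order.takeWhile (fun s => decide (j < c s)) ++
            order.dropWhile (fun s => decide (j < c s)))[k]'(by rw [hsplit]; exact hklen) :=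
          List.getElem_of_eq hsplit.symm hklen
        rw [he, List.getElem_append_right htw]
        exact List.getElem_mem _
      have hle : c order[k] ≤ j := by
        have := hdw _ hmem
        omega
      rw [if_pos (by exact_mod_cast hle)]
      exact ihk htw (by omega)
    · have hk1 : k < (order.takeWhile (fun s => decide (j < c s))).length := by omega
      have hmem : order[k] ∈ order.takeWhile (fun s => decide (j < c s)) := by
        have he : order[k] = (order.takeWhile (fun s => decide (j < c s)) ++
            order.dropWhile (fun s => decide (j < c s)))[k]'(by rw [hsplit]; exact hklen) :=
          List.getElem_of_eq hsplit.symm hklen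
        rw [he, List.getElem_append_left hk1]
        exact List.getElem_mem _
      have hlt : j < c order[k] := by
        have := List.mem_takeWhile_imp hmem
        simpa using this
      rw [if_neg (by omega)]
      omega

-- B's round loop, unrolled over List.range
theorem pvBFold (count : PySem.Dict String Int) (order : List String) (c : String → Nat)
    (hc : ∀ s, count.getD s 0 = (c s : Int))
    (hpair : order.Pairwise (fun a b => c b ≤ c a)) (m : Nat) :
    (List.range m).foldl
      (fun (st : Nat × List String) (k : Nat) =>
        (pvBShrink count order (k : Int) st.1,
         st.2 ++ order.take (pvBShrink count order (k : Int) st.1)))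
      (order.length, []) =
    ((if m = 0 then order.length else (order.takeWhile (fun s => decide (m - 1 < c s))).length),
     pvRounds c order m) := by
  induction m with
  | zero => simp [pvRounds]
  | succ m ihm =>
    rw [List.range_succ, List.foldl_append, ihm, List.foldl_cons, List.foldl_nil]
    have hKlen : (if m = 0 then order.length
        else (order.takeWhile (fun s => decide (m - 1 < c s))).length) ≤ order.length := by
      split_ifs
      · exact le_refl _
      · exact (List.takeWhile_prefix _).length_le
    have hKge : (order.takeWhile (fun s => decide (m < c s))).length ≤
        (if m = 0 then order.length
         else (order.takeWhile (fun s => decide (m - 1 < c s))).length) := by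
      split_ifs
      · exact (List.takeWhile_prefix _).length_le
      · refine pvTakeWhile_len_le _ _ ?_ order
        intro x hx
        simp only [decide_eq_true_eq] at *
        omega
    have hs := pvBShrink_eq count order c hc m hpair _ hKge hKlen
    rw [hs]
    have htake : order.take (order.takeWhile (fun s => decide (m < c s))).length =
        order.takeWhile (fun s => decide (m < c s)) :=
      (List.prefix_iff_eq_take.mp (List.takeWhile_prefix _)).symm
    have hfil : order.filter (fun s => decide (m < c s)) =
        order.takeWhile (fun s => decide (m < c s)) := by
      refine pvFilter_eq_takeWhile _ order (hpair.imp ?_)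
      intro a b hab hb
      simp only [decide_eq_true_eq] at *
      omega
    have hrounds : pvRounds c order (m + 1) =
        pvRounds c order m ++ order.filter (fun s => decide (m < c s)) := by
      unfold pvRounds
      rw [List.range_succ, List.flatMap_append]
      simp
    rw [htake, hrounds, hfil]
    simp

theorem pvGetD_foldl_insert (f : String → List String) :
    ∀ (ks : List String) (d : PySem.Dict String (List String)) (s : String),
    (ks.foldl (fun d k => d.insert k (f k)) d).getD s [] =
      if s ∈ ks then f s else d.getD s [] := by
  intro ks
  induction ks with
  | nil => intro d s; simp
  | cons k ks ih =>
    intro d s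
    rw [List.foldl_cons, ih]
    by_cases hs : s ∈ ks
    · simp [hs]
    · rw [if_neg hs, PySem.Dict.getD_insert]
      by_cases hsk : s = k
      · subst hsk; simp
      · simp [hsk, hs]

-- ===== VERDICT (by name: the statement is the Claim_ definition above) =====
theorem interleave_sports_py_spec : Claim_equal_interleave_sports_py := by
  intro sports _
  unfold Spec_interleave_sports_py interleave_sports_py interleave_sports_py_alt
  simp only []
  set count := PySem.Dict.counter sports with hcount
  set order := PySem.List.sorted count.keys (fun s => -(count.getD s 0)) false with horder
  set c : String → Nat := fun s => sports.count s with hcdef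
  have hc : ∀ s, count.getD s 0 = (c s : Int) := fun s => PySem.Dict.getD_counter sports s
  have hnd : order.Nodup :=
    ((PySem.List.sorted_perm _ _ _).nodup_iff).mpr (PySem.Dict.nodup_keys_counter sports)
  have hpair : order.Pairwise (fun a b => c b ≤ c a) := by
    have hp := PySem.List.sorted_pairwise count.keys (fun s => -(count.getD s 0))
    rw [← horder] at hp
    refine hp.imp ?_
    intro a b hab
    rw [hc a, hc b] at hab
    omega
  have hbk : ∀ s ∈ order,
      (count.items.foldl (fun d p => d.insert p.1 (List.replicate p.2.toNat p.1))
        PySem.Dict.empty).getD s [] = List.replicate (c s) s := by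
    intro s hs
    have hsk : s ∈ PySem.Set.ofList sports := by
      have := (PySem.List.mem_sorted count.keys (fun s => -(count.getD s 0)) false s).mp
        (horder ▸ hs)
      rwa [PySem.Dict.keys_counter] at this
    rw [hcount, PySem.Dict.items_counter, List.foldl_map,
      pvGetD_foldl_insert (fun k => List.replicate ((sports.count k : Int)).toNat k) _ _ s,
      if_pos hsk]
    simp
    rw [hcdef]
  rw [pvAWhile_eq (pvMOver c order) c order _ [] hnd rfl hbk, List.nil_append]
  cases horder0 : order with
  | nil =>
    rw [PySem.List.pyRange_one_eq_nil (le_refl 0), List.foldl_nil]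
    simp [pvRounds]
  | cons s0 tl =>
    simp only []
    rw [hc s0, PySem.List.pyRange_zero_natCast, List.foldl_map]
    have hb := pvBFold count order c hc hpair (c s0)
    rw [horder0] at hb
    rw [hb]
    have hmax : ∀ y ∈ order, c y ≤ c s0 := by
      intro y hy
      have hmemk : y ∈ count.keys :=
        (PySem.List.mem_sorted count.keys (fun s => -(count.getD s 0)) false y).mp (horder ▸ hy)
      have := PySem.List.key_head_sorted_le count.keys (fun s => -(count.getD s 0))
        (horder ▸ horder0) y hmemk
      simp only [] at this
      rw [hc s0, hc y] at this
      omega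
    have hm : pvMOver c order = c s0 := by
      have h1 := (PySem.List.le_foldl_max (order.map c) 0).2 (c s0)
        (List.mem_map_of_mem (by rw [horder0]; exact List.mem_cons_self))
      have h2 : pvMOver c order ≤ c s0 := by
        rcases PySem.List.foldl_max_mem (order.map c) 0 with h0 | hmem
        · rw [pvMOver, h0]; omega
        · obtain ⟨y, hy, heq⟩ := List.mem_map.mp hmem
          rw [pvMOver, ← heq]; exact hmax y hy
      unfold pvMOver at h1 h2 ⊢
      omega
    rw [horder0] at hm
    rw [hm]
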